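-- pv_equiv track=rewrite | github.com/mcodnjs/21W-CodeTest-Study | YJH/22.1.10 homework/level3.banuser/banuser.py | solution
-- ===== SOURCE A (Python) =====
-- def solution(user_id, banned_id):
--     cnt = [[]]
--     answer=[]
--     for j in range(len(banned_id)):
--         new=[]
--         for i in range(len(user_id)):
--             if len(user_id[i])==len(banned_id[j]):  #1차적으로 user와 ban의 id가 같으면 True, 아니면 False
--                 cnt1 = True #문자열이 같은지 다른지 check할 기준
--                 for p in range(len(banned_id[j])):
--                     if banned_id[j][p]=='*':    #*이 나오면 그냥 pass
--                         continue
--                     elif banned_id[j][p]==user_id[i][p]: #같아도 Pass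
--                         continue
--                     else:   #문자열이 다를경우 False 변환
--                         cnt1 = False
--                         break
--                 if cnt1 == True:    #같으면
--                     for c in cnt:   #cnt를 기준으로 for문 순회
--                         if user_id[i] not in c: #만약 cnt의 인덱스 안에 해당 user_id가 없다면
--                             new.append(c+[user_id[i]])  #앞의 것도 추가해서 새로운 리스트에 추가해준다.
--             else:
--                 continue
--         cnt = new   #여기서 새로운 리스트를 cnt로 옮겨준다음, new리스트는 다음 인덱스 비교를 위해 초기화
--     for c in cnt:
--         if set(c) not in answer:    #set(c)로 중복 제거
--             answer.append(set(c))
--     return len(answer)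
-- ===== SOURCE B (Python) =====
-- def solution(user_id, banned_id):
--     result = set()
--
--     def dfs(j, chosen):
--         if j == len(banned_id):
--             result.add(frozenset(chosen))
--             return
--         b = banned_id[j]
--         for u in user_id:
--             if len(u) == len(b) and all(bc == '*' or bc == uc for bc, uc in zip(b, u)) and u not in chosen:
--                 dfs(j + 1, chosen + [u])
--
--     dfs(0, [])
--     return len(result)
-- ===== Notes on version B (the rewrite author's own statement) =====
-- stated objective: alternative
-- what changed: A builds every layer of partial user lists breadth-first (cnt -> new per banned pattern) and dedups at the end; B does a recursive depth-first search over banned_id, extending one candidate list at a time and inserting each complete assignment as a frozenset into a result set.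
import Mathlib
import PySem

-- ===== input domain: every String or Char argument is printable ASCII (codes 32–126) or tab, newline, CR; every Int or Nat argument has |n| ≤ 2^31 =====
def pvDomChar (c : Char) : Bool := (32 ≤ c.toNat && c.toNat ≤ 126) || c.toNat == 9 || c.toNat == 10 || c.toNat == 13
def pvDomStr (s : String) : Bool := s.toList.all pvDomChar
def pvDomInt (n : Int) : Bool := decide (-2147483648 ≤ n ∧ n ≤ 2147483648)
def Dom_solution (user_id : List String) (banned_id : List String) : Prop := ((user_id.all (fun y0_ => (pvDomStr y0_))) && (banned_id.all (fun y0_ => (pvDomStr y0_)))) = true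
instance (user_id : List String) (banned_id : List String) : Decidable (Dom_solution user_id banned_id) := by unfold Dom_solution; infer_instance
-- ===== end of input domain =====

-- B replaces A's layer-by-layer breadth-first construction of all partial assignment
-- lists with a recursive depth-first search that dedups complete assignments as sets;
-- objective: alternative decomposition (same result, same asymptotic cost).

-- ===== PORT A =====
-- A's innermost char loop with its break, as structural recursion over the two char
-- lists in parallel (exact: the loop indexes p < range(len(banned)), and the strings
-- have equal length whenever this is called).
def matchA : List Char → List Char → Bool
  | [], _ => true
  | _ :: _, [] => true
  | b :: bs, u :: us =>
      if b = '*' then matchA bs us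
      else if b = u then matchA bs us
      else false

-- body of A's outer `for j in range(len(banned_id))` loop: builds `new` from `cnt`
def stepA (user_id : List String) (cnt : List (List String)) (bj : String) : List (List String) :=
  user_id.foldl (fun new u =>
    if u.toList.length = bj.toList.length then
      (if matchA bj.toList u.toList then
        cnt.foldl (fun new c => if u ∉ c then new ++ [c ++ [u]] else new) new
      else new)
    else new) []

-- `set(c) not in answer` compares Python sets by set equality: PySem.Set.equal
def solution (user_id : List String) (banned_id : List String) : Int :=
  let cnt := banned_id.foldl (stepA user_id) [[]]
  let answer := cnt.foldl (fun ans c =>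
    if ans.any (fun s => PySem.Set.equal (PySem.Set.ofList c) s) then ans
    else ans ++ [PySem.Set.ofList c]) ([] : List (PySem.Set String))
  (answer.length : Int)

-- ===== PORT B =====
def matchB (b u : List Char) : Bool := (b.zip u).all (fun p => p.1 = '*' || p.1 = p.2)

-- result.add(frozenset(chosen)): the result is a set of frozensets, i.e. a list of
-- PySem.Sets deduplicated by Python's set equality (Set.equal); exact here because B
-- only takes its len, which does not depend on hash iteration order.
def addSet (acc : List (PySem.Set String)) (s : PySem.Set String) : List (PySem.Set String) :=
  if acc.any (fun t => PySem.Set.equal s t) then acc else acc ++ [s]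

-- B's dfs(j, chosen), recursing on the remaining suffix of banned_id and threading
-- the mutable `result` set as `acc`
def dfsB (user_id : List String) : List String → List (PySem.Set String) → List String → List (PySem.Set String)
  | chosen, acc, [] => addSet acc (PySem.Set.ofList chosen)
  | chosen, acc, b :: bs =>
      user_id.foldl (fun acc u =>
        if ((u.toList.length == b.toList.length) && matchB b.toList u.toList) && decide (u ∉ chosen)
        then dfsB user_id (chosen ++ [u]) acc bs else acc) acc

def solution_alt (user_id : List String) (banned_id : List String) : Int :=
  ((dfsB user_id [] [] banned_id).length : Int)

-- ===== PRECONDITION & SPEC =====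
def Spec_solution (user_id : List String) (banned_id : List String) (out : Int) : Prop := out = solution_alt user_id banned_id
instance (user_id : List String) (banned_id : List String) (out : Int) : Decidable (Spec_solution user_id banned_id out) := by unfold Spec_solution; infer_instance

-- ===== CLAIM (what is proved, stated in full; the proofs are below) =====
def Claim_equal_solution : Prop := ∀ (user_id : List String) (banned_id : List String), Dom_solution user_id banned_id → Spec_solution user_id banned_id (solution user_id banned_id)

-- ===== LEMMAS AND PROOFS =====

theorem matchA_eq_matchB : ∀ (b u : List Char), b.length = u.length → matchA b u = matchB b u := by
  intro b
  induction b with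
  | nil => intro u h; simp [matchA, matchB]
  | cons c bs ih =>
    intro u h
    cases u with
    | nil => simp at h
    | cons d us =>
      simp only [List.length_cons, Nat.add_right_cancel_iff] at h
      simp only [matchA, matchB, List.zip_cons_cons, List.all_cons]
      split_ifs with h1 h2 <;> simp_all [ih us h, matchB]

theorem foldl_flatMap_eq {α β γ : Type} (g : γ → β → γ) (f : α → List β) :
    ∀ (l : List α) (a : γ), (l.flatMap f).foldl g a = l.foldl (fun acc x => (f x).foldl g acc) a := by
  intro l
  induction l with
  | nil => intro a; rfl
  | cons x l ih => intro a; simp [List.flatMap_cons, List.foldl_append, ih]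

theorem flatMap_comm_perm {α β γ : Type} (l1 : List α) (l2 : List β) (f : α → β → List γ) :
    (l1.flatMap fun a => l2.flatMap fun b => f a b).Perm (l2.flatMap fun b => l1.flatMap fun a => f a b) := by
  rw [← Multiset.coe_eq_coe]
  simp only [← Multiset.coe_bind]
  exact Multiset.bind_bind (l1 : Multiset α) (l2 : Multiset β)

theorem filter_flatMap_if {α β : Type} (p : α → Bool) (f : α → List β) :
    ∀ (L : List α), (L.filter p).flatMap f = L.flatMap (fun c => if p c then f c else []) := by
  intro L
  induction L with
  | nil => rfl
  | cons c L ih =>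
    by_cases h : p c <;> simp [h, ih]

def condP (u b : String) : Bool := (u.toList.length == b.toList.length) && matchB b.toList u.toList

def leaves (user_id : List String) : List String → List String → List (List String)
  | chosen, [] => [chosen]
  | chosen, b :: bs =>
      user_id.flatMap (fun u =>
        if condP u b && decide (u ∉ chosen) then leaves user_id (chosen ++ [u]) bs else [])

theorem dfsB_eq (user_id : List String) :
    ∀ (bs chosen : List String) (acc : List (PySem.Set String)),
      dfsB user_id chosen acc bs = ((leaves user_id chosen bs).map PySem.Set.ofList).foldl addSet acc := by
  intro bs
  induction bs with
  | nil => intro chosen acc; simp [dfsB, leaves]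
  | cons b bs ih =>
    intro chosen acc
    rw [dfsB, leaves, List.map_flatMap, foldl_flatMap_eq]
    apply PySem.List.foldl_congr_mem
    intro a u _
    by_cases h : (condP u b && decide (u ∉ chosen)) = true
    · have h' := h; simp only [condP] at h'
      rw [if_pos h', if_pos h, ih]
    · have h' := h; simp only [condP] at h'
      rw [if_neg h', if_neg h]; rfl

theorem stepA_eq (user_id : List String) (cnt : List (List String)) (b : String) :
    stepA user_id cnt b =
      user_id.flatMap (fun u =>
        if condP u b then (cnt.filter (fun c => decide (u ∉ c))).map (fun c => c ++ [u]) else []) := by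
  unfold stepA
  have hstep : ∀ (new : List (List String)) (u : String),
      (if u.toList.length = b.toList.length then
        (if matchA b.toList u.toList then
          cnt.foldl (fun new c => if u ∉ c then new ++ [c ++ [u]] else new) new
        else new)
      else new)
      = new ++ (if condP u b then (cnt.filter (fun c => decide (u ∉ c))).map (fun c => c ++ [u]) else []) := by
    intro new u
    by_cases h1 : u.toList.length = b.toList.length
    · rw [if_pos h1, matchA_eq_matchB _ _ h1.symm]
      by_cases h2 : matchB b.toList u.toList
      · rw [if_pos h2, PySem.List.foldl_append_ite (fun c => u ∉ c) (fun c => c ++ [u]),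
          if_pos (by simp [condP, h1, h2])]
      · simp [h2, condP]
    · have h2 : ¬ ((u.toList.length == b.toList.length) && matchB b.toList u.toList) = true := by
        intro hc
        rw [Bool.and_eq_true, beq_iff_eq] at hc
        exact h1 hc.1
      simp only [condP]
      rw [if_neg h1, if_neg h2, List.append_nil]
  calc user_id.foldl (fun new u =>
        if u.toList.length = b.toList.length then
          (if matchA b.toList u.toList then
            cnt.foldl (fun new c => if u ∉ c then new ++ [c ++ [u]] else new) new
          else new)
        else new) []
      = user_id.foldl (fun new u => new ++ (if condP u b then (cnt.filter (fun c => decide (u ∉ c))).map (fun c => c ++ [u]) else [])) [] := by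
        apply PySem.List.foldl_congr_mem; intro a u _; exact hstep a u
    _ = _ := by rw [PySem.List.foldl_append_eq_flatMap]; simp

theorem perm_main (user_id : List String) :
    ∀ (bs : List String) (L : List (List String)),
      (bs.foldl (stepA user_id) L).Perm (L.flatMap (fun c => leaves user_id c bs)) := by
  intro bs
  induction bs with
  | nil => intro L; simp [leaves]
  | cons b bs ih =>
    intro L
    rw [List.foldl_cons]
    refine (ih (stepA user_id L b)).trans ?_
    rw [stepA_eq, List.flatMap_assoc]
    have hx : ∀ u : String,
        ((if condP u b then (L.filter (fun c => decide (u ∉ c))).map (fun c => c ++ [u]) else []).flatMap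
          (fun c => leaves user_id c bs))
        = L.flatMap (fun c => if condP u b && decide (u ∉ c) then leaves user_id (c ++ [u]) bs else []) := by
      intro u
      by_cases h : condP u b = true
      · rw [if_pos h, List.flatMap_map, filter_flatMap_if]
        refine congrArg (fun g => List.flatMap g L) (funext fun c => ?_)
        by_cases hc : u ∈ c <;> simp [h, hc]
      · rw [if_neg h]
        have hz : ∀ c : List String, (if condP u b && decide (u ∉ c) then leaves user_id (c ++ [u]) bs else []) = [] := by
          intro c; simp [h]
        have h2 : L.flatMap (fun c => if condP u b && decide (u ∉ c) then leaves user_id (c ++ [u]) bs else [])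
            = L.flatMap (fun _ => ([] : List (List String))) :=
          congrArg (fun g => List.flatMap g L) (funext hz)
        rw [h2]
        simp
    rw [funext hx]
    refine (flatMap_comm_perm user_id L _).trans ?_
    refine List.Perm.of_eq (congrArg (fun g => List.flatMap g L) (funext fun c => ?_))
    simp only [leaves]

theorem equal_toFinset (s t : List String) : PySem.Set.equal s t = true ↔ s.toFinset = t.toFinset := by
  rw [PySem.Set.equal_iff]
  constructor
  · intro h; ext x; simpa [List.mem_toFinset] using h x
  · intro h x; simpa [List.mem_toFinset] using Finset.ext_iff.mp h x

def addF (acc : List (Finset String)) (f : Finset String) : List (Finset String) :=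
  if f ∈ acc then acc else acc ++ [f]

theorem addSet_map (acc : List (PySem.Set String)) (s : PySem.Set String) :
    (addSet acc s).map List.toFinset = addF (acc.map List.toFinset) s.toFinset := by
  have e : ∀ t : PySem.Set String, PySem.Set.equal s t = decide (s.toFinset = t.toFinset) := by
    intro t
    by_cases hh : s.toFinset = t.toFinset
    · simp [hh, (equal_toFinset s t).mpr hh]
    · have hne : PySem.Set.equal s t ≠ true := fun hc => hh ((equal_toFinset s t).mp hc)
      simp [hh, hne]
  have h : (acc.any fun t => PySem.Set.equal s t) = decide (s.toFinset ∈ acc.map List.toFinset) := by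
    by_cases hm : s.toFinset ∈ acc.map List.toFinset
    · have hx : (acc.any fun t => PySem.Set.equal s t) = true := by
        rw [List.any_eq_true]
        obtain ⟨fs, hfs, heq⟩ := List.mem_map.mp hm
        exact ⟨fs, hfs, (equal_toFinset s fs).mpr heq.symm⟩
      simp [hx, hm]
    · have hx : (acc.any fun t => PySem.Set.equal s t) = false := by
        rw [List.any_eq_false]
        intro t ht hc
        exact hm (List.mem_map.mpr ⟨t, ht, ((equal_toFinset s t).mp hc).symm⟩)
      simp [hx, hm]
  unfold addSet addF
  rw [h]
  by_cases hm : s.toFinset ∈ acc.map List.toFinset <;> simp [hm]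

theorem foldl_addSet_map : ∀ (L : List (PySem.Set String)) (acc : List (PySem.Set String)),
    (L.foldl addSet acc).map List.toFinset = (L.map List.toFinset).foldl addF (acc.map List.toFinset) := by
  intro L
  induction L with
  | nil => intro acc; rfl
  | cons s L ih => intro acc; simp [ih, addSet_map]

theorem foldl_addF_inv : ∀ (l : List (Finset String)) (acc : List (Finset String)), acc.Nodup →
    (l.foldl addF acc).Nodup ∧ (l.foldl addF acc).toFinset = acc.toFinset ∪ l.toFinset := by
  intro l
  induction l with
  | nil => intro acc h; simpa using h
  | cons f l ih =>
    intro acc h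
    rw [List.foldl_cons]
    unfold addF
    by_cases hm : f ∈ acc
    · obtain ⟨h1, h2⟩ := ih acc h
      rw [if_pos hm]
      refine ⟨h1, h2.trans ?_⟩
      ext x
      by_cases hx : x = f <;> simp [hx, hm, List.mem_toFinset]
    · have h' : (acc ++ [f]).Nodup := by
        simp [List.nodup_append, h]
        intro a ha hfa
        exact hm (hfa ▸ ha)
      obtain ⟨h1, h2⟩ := ih (acc ++ [f]) h'
      rw [if_neg hm]
      refine ⟨h1, h2.trans ?_⟩
      ext x
      by_cases hx : x = f <;> simp [hx, List.mem_toFinset]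

theorem count_eq : ∀ (L : List (PySem.Set String)),
    (L.foldl addSet []).length = ((L.map List.toFinset).toFinset).card := by
  intro L
  have h1 : (L.foldl addSet []).length = ((L.foldl addSet []).map List.toFinset).length := by
    rw [List.length_map]
  rw [h1, foldl_addSet_map]
  simp only [List.map_nil]
  obtain ⟨hn, hf⟩ := foldl_addF_inv (L.map List.toFinset) [] (List.nodup_nil)
  rw [← List.toFinset_card_of_nodup hn, hf]
  simp

theorem solution_eq_alt (user_id banned_id : List String) : solution user_id banned_id = solution_alt user_id banned_id := by
  show (((banned_id.foldl (stepA user_id) [[]]).foldl (fun ans c =>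
    if ans.any (fun s => PySem.Set.equal (PySem.Set.ofList c) s) then ans
    else ans ++ [PySem.Set.ofList c]) ([] : List (PySem.Set String))).length : Int)
    = ((dfsB user_id [] [] banned_id).length : Int)
  rw [dfsB_eq]
  have hA : ∀ (cnt : List (List String)),
      cnt.foldl (fun ans c =>
        if ans.any (fun s => PySem.Set.equal (PySem.Set.ofList c) s) then ans
        else ans ++ [PySem.Set.ofList c]) ([] : List (PySem.Set String))
      = (cnt.map PySem.Set.ofList).foldl addSet [] := by
    intro cnt
    rw [List.foldl_map]
    rfl
  rw [hA, count_eq, count_eq]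
  have p : (banned_id.foldl (stepA user_id) [[]]).Perm (leaves user_id [] banned_id) := by
    refine (perm_main user_id banned_id [[]]).trans ?_
    simp
  rw [List.toFinset_eq_of_perm _ _ ((p.map PySem.Set.ofList).map List.toFinset)]

-- ===== VERDICT (by name: the statement is the Claim_ definition above) =====
theorem solution_spec : Claim_equal_solution := by
  intro user_id banned_id _
  unfold Spec_solution
  exact solution_eq_alt user_id banned_id
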